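-- pv_equiv track=rewrite | github.com/JayPatil165/TestGen-AI | src/testgen/core/test_merger.py | preserve_manual_tests
-- ===== SOURCE A (Python) =====
-- from typing import List, Set, Tuple, Optional
--
-- def preserve_manual_tests(
--
--     code: str,
--     marker: str = "# MANUAL TEST"
-- ) -> Tuple[str, List[str]]:
--     """
--     Identify and preserve manually written tests (Task 42 requirement).
--
--     Args:
--         code: Test code
--         marker: Comment marker for manual tests
--
--     Returns:
--         (code, list of manual test names)
--     """
--     manual_tests = []
--     lines = code.split('\n')
--
--     # Look for manual test markers
--     for i, line in enumerate(lines):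
--         if marker in line:
--             # Find the next test function
--             for j in range(i, min(i + 10, len(lines))):
--                 if 'def test_' in lines[j]:
--                     # Extract test name
--                     test_name = lines[j].split('def ')[1].split('(')[0]
--                     manual_tests.append(test_name)
--                     break
--
--     return code, manual_tests
-- ===== SOURCE B (Python) =====
-- from typing import List, Tuple
--
-- def preserve_manual_tests(
--     code: str,
--     marker: str = "# MANUAL TEST"
-- ) -> Tuple[str, List[str]]:
--     """Index-table variant: one pass collects (line_index, test_name) for every
--     line containing 'def test_'; each marker line then queries the table for the
--     first test at or after it, accepting it if it lies within the 10-line window."""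
--     lines = code.split('\n')
--     tests = [
--         (j, ln.split('def ')[1].split('(')[0])
--         for j, ln in enumerate(lines)
--         if 'def test_' in ln
--     ]
--     manual_tests = []
--     for i, line in enumerate(lines):
--         if marker in line:
--             hit = next((t for t in tests if t[0] >= i), None)
--             if hit is not None and hit[0] < i + 10:
--                 manual_tests.append(hit[1])
--     return code, manual_tests
-- ===== Notes on version B (the rewrite author's own statement) =====
-- stated objective: alternative
-- what changed: B replaces A's per-marker bounded lookahead over the raw lines with a precomputed index table of (line index, test name) pairs for all test-definition lines, which each marker line queries for the first entry at or after it within the 10-line window.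
import Mathlib
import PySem

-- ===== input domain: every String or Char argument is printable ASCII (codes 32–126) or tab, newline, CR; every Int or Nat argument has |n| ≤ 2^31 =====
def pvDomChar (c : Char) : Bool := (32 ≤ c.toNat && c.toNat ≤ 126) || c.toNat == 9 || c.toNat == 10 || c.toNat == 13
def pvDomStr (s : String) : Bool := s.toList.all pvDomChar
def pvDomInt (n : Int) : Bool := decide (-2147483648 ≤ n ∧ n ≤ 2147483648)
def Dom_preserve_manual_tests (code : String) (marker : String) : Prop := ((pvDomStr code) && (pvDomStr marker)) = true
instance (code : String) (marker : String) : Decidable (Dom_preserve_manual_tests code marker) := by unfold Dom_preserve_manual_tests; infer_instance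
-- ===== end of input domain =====

-- B builds a one-pass index table of the test-definition lines which each marker line queries,
-- instead of A's bounded lookahead that rescans the lines (objective: alternative decomposition).

-- ===== PORT A =====
-- code.split('\n'); the separator "\n" is nonempty, so split? is always `some`
def pmtLines (code : String) : List String :=
  (PySem.Str.split? code "\n").getD []

-- shared helper: s.split('def ')[1].split('(')[0]  (both Pythons use this exact expression;
-- the separators are nonempty so split? is `some`; both indices are in range whenever
-- 'def test_' occurs in s, so the .getD defaults are never used on the lines this is applied to)
def pmtExtract (s : String) : String :=
  let part := PySem.List.pyGetD ((PySem.Str.split? s "def ").getD []) 1 ""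
  PySem.List.pyGetD ((PySem.Str.split? part "(").getD []) 0 ""

-- inner loop of A: 'for j in range(i, min(i+10, len(lines))): if "def test_" in lines[j]: … break'
-- (j is always a valid index, so pyGetD's default is never used)
def pmtInner (js : List Int) (lines : List String) : Option String :=
  match js with
  | [] => none
  | j :: rest =>
    let line := PySem.List.pyGetD lines j ""
    if PySem.Str.isIn "def test_" line then some (pmtExtract line)
    else pmtInner rest lines

-- body of A's outer 'for i, line in enumerate(lines)' loop
def pmtBodyA (lines : List String) (marker : String) (acc : List String) (p : Int × String) : List String :=
  if PySem.Str.isIn marker p.2 then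
    match pmtInner (PySem.List.pyRange p.1 (min (p.1 + 10) (lines.length : Int))) lines with
    | some name => acc ++ [name]
    | none => acc
  else acc

def preserve_manual_tests (code : String) (marker : String) : String × List String :=
  let lines := pmtLines code
  (code, (PySem.List.enumerate lines).foldl (pmtBodyA lines marker) [])

-- ===== PORT B =====
-- the index table: [(j, name) for j, ln in enumerate(lines) if 'def test_' in ln]
def pmtTests (lines : List String) : List (Int × String) :=
  ((PySem.List.enumerate lines).filter (fun p => PySem.Str.isIn "def test_" p.2)).map
    (fun p => (p.1, pmtExtract p.2))

-- body of B's loop: query the table for the first test-def at or after i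
def pmtBodyB (tests : List (Int × String)) (marker : String) (acc : List String) (p : Int × String) : List String :=
  if PySem.Str.isIn marker p.2 then
    match tests.find? (fun q => decide (p.1 ≤ q.1)) with
    | some q => if q.1 < p.1 + 10 then acc ++ [q.2] else acc
    | none => acc
  else acc

def preserve_manual_tests_alt (code : String) (marker : String) : String × List String :=
  let lines := pmtLines code
  let tests := pmtTests lines
  (code, (PySem.List.enumerate lines).foldl (pmtBodyB tests marker) [])

-- ===== PRECONDITION & SPEC =====
def Spec_preserve_manual_tests (code : String) (marker : String) (out : String × List String) : Prop := out = preserve_manual_tests_alt code marker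
instance (code : String) (marker : String) (out : String × List String) : Decidable (Spec_preserve_manual_tests code marker out) := by unfold Spec_preserve_manual_tests; infer_instance

-- ===== CLAIM (what is proved, stated in full; the proofs are below) =====
def Claim_equal_preserve_manual_tests : Prop := ∀ (code : String) (marker : String), Dom_preserve_manual_tests code marker → Spec_preserve_manual_tests code marker (preserve_manual_tests code marker)

-- ===== LEMMAS AND PROOFS =====

-- Querying the filtered enumeration for the first index ≥ i is the same as scanning
-- the enumeration's suffix from position i.
theorem pmt_find_filter (ls : List String) (s i : Int) :
    ((PySem.List.enumerate ls s).filter (fun p => PySem.Str.isIn "def test_" p.2)).find?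
        (fun q => decide (i ≤ q.1))
      = ((PySem.List.enumerate ls s).drop (i - s).toNat).find?
        (fun p => PySem.Str.isIn "def test_" p.2) := by
  induction ls generalizing s i with
  | nil => rw [PySem.List.enumerate_nil]; simp
  | cons x t ih =>
    rw [PySem.List.enumerate_cons]
    by_cases hle : i ≤ s
    · have h0 : (i - s).toNat = 0 := by omega
      rw [h0, List.drop_zero]
      by_cases hx : PySem.Str.isIn "def test_" x = true
      · rw [List.filter_cons_of_pos (p := fun p : Int × String => PySem.Str.isIn "def test_" p.2) (a := (s, x)) hx,
            List.find?_cons_of_pos (p := fun q : Int × String => decide (i ≤ q.1)) (a := (s, x)) (by simpa using hle),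
            List.find?_cons_of_pos (p := fun p : Int × String => PySem.Str.isIn "def test_" p.2) (a := (s, x)) hx]
      · rw [List.filter_cons_of_neg (p := fun p : Int × String => PySem.Str.isIn "def test_" p.2) (a := (s, x)) hx,
            List.find?_cons_of_neg (p := fun p : Int × String => PySem.Str.isIn "def test_" p.2) (a := (s, x)) hx, ih (s+1) i]
        have h1 : (i - (s+1)).toNat = 0 := by omega
        rw [h1, List.drop_zero]
    · have h0 : (i - s).toNat = (i - (s+1)).toNat + 1 := by omega
      rw [h0, List.drop_succ_cons, ← ih (s+1) i]
      by_cases hx : PySem.Str.isIn "def test_" x = true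
      · rw [List.filter_cons_of_pos (p := fun p : Int × String => PySem.Str.isIn "def test_" p.2) (a := (s, x)) hx,
            List.find?_cons_of_neg (p := fun q : Int × String => decide (i ≤ q.1)) (a := (s, x)) (by simpa using hle)]
      · rw [List.filter_cons_of_neg (p := fun p : Int × String => PySem.Str.isIn "def test_" p.2) (a := (s, x)) hx]

-- A's bounded lookahead over [i, min(i+d, len)) equals a find? over the enumeration's
-- suffix, guarded by the window bound.
theorem pmt_inner_eq (lines : List String) (i d : Nat) :
    pmtInner (PySem.List.pyRange (i : Int) (min ((i : Int) + (d : Nat)) (lines.length : Int))) lines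
      = match ((PySem.List.enumerate lines 0).drop i).find?
              (fun p => PySem.Str.isIn "def test_" p.2) with
        | some p => if p.1 < (i : Int) + (d : Nat) then some (pmtExtract p.2) else none
        | none => none := by
  induction d generalizing i with
  | zero =>
    rw [PySem.List.pyRange_one_eq_nil (by omega)]
    cases hf : ((PySem.List.enumerate lines 0).drop i).find?
        (fun p => PySem.Str.isIn "def test_" p.2) with
    | none => rfl
    | some p =>
      have hmem := List.mem_of_find?_eq_some hf
      obtain ⟨m, hm, hget⟩ := List.getElem_of_mem hmem
      have hp1 : p.1 = (0 : Int) + (i + m : Nat) := by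
        rw [← hget, List.getElem_drop, PySem.List.getElem_enumerate]
      have hnlt : ¬ (p.1 < (i : Int) + ((0 : Nat) : Int)) := by
        rw [hp1]; push_cast; omega
      show pmtInner [] lines
          = if p.1 < (i : Int) + ((0 : Nat) : Int) then some (pmtExtract p.2) else none
      rw [if_neg hnlt]
      rfl
  | succ d ih =>
    by_cases hlt : i < lines.length
    · have hcons : (PySem.List.enumerate lines 0).drop i
          = (((0 : Int) + (i : Nat), lines[i]) :: (PySem.List.enumerate lines 0).drop (i+1)) := by
        have h : i < (PySem.List.enumerate lines 0).length := by
          rw [PySem.List.length_enumerate]; exact hlt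
        rw [List.drop_eq_getElem_cons h, PySem.List.getElem_enumerate]
      rw [PySem.List.pyRange_one_cons (by push_cast; omega)]
      show (if PySem.Str.isIn "def test_" (PySem.List.pyGetD lines (i : Int) "")
              then some (pmtExtract (PySem.List.pyGetD lines (i : Int) ""))
              else pmtInner (PySem.List.pyRange ((i : Int) + 1)
                (min ((i : Int) + ((d+1 : Nat) : Int)) (lines.length : Int))) lines) = _
      rw [PySem.List.pyGetD_natCast, List.getD_eq_getElem lines "" hlt, hcons]
      by_cases hx : PySem.Str.isIn "def test_" lines[i] = true
      · rw [if_pos hx,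
            List.find?_cons_of_pos (p := fun p : Int × String => PySem.Str.isIn "def test_" p.2) (a := ((0 : Int) + (i : Nat), lines[i])) hx]
        have hw : ((0 : Int) + (i : Nat)) < (i : Int) + ((d+1 : Nat) : Int) := by
          push_cast; omega
        show some (pmtExtract lines[i])
            = if ((0 : Int) + (i : Nat)) < (i : Int) + ((d+1 : Nat) : Int)
              then some (pmtExtract lines[i]) else none
        rw [if_pos hw]
      · rw [if_neg hx,
            List.find?_cons_of_neg (p := fun p : Int × String => PySem.Str.isIn "def test_" p.2) (a := ((0 : Int) + (i : Nat), lines[i])) hx]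
        have harg : min ((i : Int) + ((d+1 : Nat) : Int)) (lines.length : Int)
            = min (((i+1 : Nat) : Int) + ((d : Nat) : Int)) (lines.length : Int) := by
          push_cast; ring_nf
        have hstep : (i : Int) + 1 = ((i+1 : Nat) : Int) := by push_cast; ring
        rw [harg, hstep, ih (i+1)]
        have hbnd : ((i+1 : Nat) : Int) + ((d : Nat) : Int)
            = (i : Int) + ((d+1 : Nat) : Int) := by push_cast; ring
        rw [hbnd]
    · rw [PySem.List.pyRange_one_eq_nil (by push_cast; omega)]
      have hdrop : (PySem.List.enumerate lines 0).drop i = [] := by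
        apply List.drop_eq_nil_of_le
        rw [PySem.List.length_enumerate]; omega
      rw [hdrop]
      rfl

-- the two loop bodies agree on every entry of the enumeration
set_option maxHeartbeats 2000000 in
theorem pmt_body_eq (lines : List String) (marker : String) (acc : List String)
    (p : Int × String) (hp : p ∈ PySem.List.enumerate lines 0) :
    pmtBodyA lines marker acc p = pmtBodyB (pmtTests lines) marker acc p := by
  unfold pmtBodyA pmtBodyB
  by_cases hm : PySem.Str.isIn marker p.2 = true
  · rw [if_pos hm, if_pos hm]
    obtain ⟨k, hk, hpk⟩ := (PySem.List.mem_enumerate_iff lines 0 p).1 hp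
    have hp1 : p.1 = (k : Int) := by rw [hpk]; simp
    unfold pmtTests
    rw [List.find?_map]
    have hcomp : ((fun q : Int × String => decide (p.1 ≤ q.1)) ∘ (fun p => (p.1, pmtExtract p.2)))
        = (fun q : Int × String => decide (p.1 ≤ q.1)) := by
      funext q; rfl
    rw [hcomp, pmt_find_filter lines 0 p.1, hp1]
    have htonat : ((k : Int) - 0).toNat = k := by omega
    rw [htonat]
    have h10 : (10 : Int) = ((10 : Nat) : Int) := by norm_num
    rw [h10, pmt_inner_eq lines k 10]
    cases hf : ((PySem.List.enumerate lines 0).drop k).find?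
        (fun p => PySem.Str.isIn "def test_" p.2) with
    | none => rfl
    | some q =>
      rw [Option.map_some]
      show (match (if q.1 < (k : Int) + ((10 : Nat) : Int)
                   then some (pmtExtract q.2) else none) with
            | some name => acc ++ [name]
            | none => acc)
          = if q.1 < (k : Int) + ((10 : Nat) : Int) then acc ++ [pmtExtract q.2] else acc
      by_cases hq : q.1 < (k : Int) + ((10 : Nat) : Int)
      · rw [if_pos hq, if_pos hq]
      · rw [if_neg hq, if_neg hq]
  · rw [if_neg hm, if_neg hm]

-- ===== VERDICT (by name: the statement is the Claim_ definition above) =====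
theorem preserve_manual_tests_spec : Claim_equal_preserve_manual_tests := by
  intro code marker _
  show (code, (PySem.List.enumerate (pmtLines code)).foldl (pmtBodyA (pmtLines code) marker) [])
      = (code, (PySem.List.enumerate (pmtLines code)).foldl (pmtBodyB (pmtTests (pmtLines code)) marker) [])
  refine congrArg (Prod.mk code) ?_
  exact PySem.List.foldl_congr_mem _ _ _ _
    (fun acc p hp => pmt_body_eq (pmtLines code) marker acc p hp)
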